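-- pv_equiv track=rewrite | github.com/hliu117/Coding-Challenge | largest_triangle_challenge.py | largest_triangle
-- ===== SOURCE A (Python) =====
-- def largest_triangle(A):
--     if len(A) >= 3:
--         A.sort()
--         for i in range(len(A) - 3, -1, -1):
--             if (A[i] + A[i+1]) > A[i+2]:
--                 return A[i] * A[i+1] * A[i+2]
--         return 0
--     else:
--         return 0
-- ===== SOURCE B (Python) =====
-- def largest_triangle(A):
--     if len(A) < 3:
--         return 0
--     A.sort()
--     n = len(A)
--     best = 0
--     for i in range(n):
--         for j in range(i + 1, n):
--             for k in range(j + 1, n):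
--                 if A[i] + A[j] > A[k]:
--                     best = max(best, A[i] * A[j] * A[k])
--     return best
-- ===== Notes on version B (the rewrite author's own statement) =====
-- stated objective: alternative
-- what changed: Replaces A's single downward scan over consecutive sorted triples by an exhaustive search over all index triples i<j<k, tracking the maximum valid product; equal because every valid triple is positive and dominated by the topmost consecutive valid triple.
import Mathlib
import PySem

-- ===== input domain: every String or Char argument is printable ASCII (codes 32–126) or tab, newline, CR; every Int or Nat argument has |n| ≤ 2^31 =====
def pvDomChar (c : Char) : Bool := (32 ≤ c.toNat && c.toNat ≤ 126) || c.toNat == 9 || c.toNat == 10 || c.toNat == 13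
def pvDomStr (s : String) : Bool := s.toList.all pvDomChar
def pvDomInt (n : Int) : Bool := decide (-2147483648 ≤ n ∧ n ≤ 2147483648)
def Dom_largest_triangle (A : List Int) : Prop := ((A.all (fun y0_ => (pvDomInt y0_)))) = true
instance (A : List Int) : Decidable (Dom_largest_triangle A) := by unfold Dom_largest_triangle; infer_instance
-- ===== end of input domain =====

-- B replaces A's downward scan of consecutive sorted triples by an exhaustive max over all
-- triples i<j<k (alternative, not faster); both Pythons sort the argument in place (same
-- side effect); the equivalence proved here is about the return value.

-- ===== PORT A =====
-- the 'for i in range(len(A)-3, -1, -1): if A[i]+A[i+1] > A[i+2]: return …' loop, i descending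
def pvScanA (L : List Int) : Nat → Int
  | 0 =>
      if L.getD 0 0 + L.getD 1 0 > L.getD 2 0 then L.getD 0 0 * L.getD 1 0 * L.getD 2 0 else 0
  | Nat.succ i =>
      if L.getD (i+1) 0 + L.getD (i+2) 0 > L.getD (i+3) 0 then
        L.getD (i+1) 0 * L.getD (i+2) 0 * L.getD (i+3) 0
      else pvScanA L i

def largest_triangle (A : List Int) : Int :=
  if A.length ≥ 3 then
    let L := PySem.List.sorted A (fun x => x) false
    pvScanA L (L.length - 3)
  else 0

-- ===== PORT B =====
-- triple nested loop over all i<j<k, tracking the running maximum 'best' (init 0)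
def pvBruteB (L : List Int) : Int :=
  let n := L.length
  (List.range n).foldl (fun best i =>
    (List.range' (i+1) (n - (i+1))).foldl (fun best j =>
      (List.range' (j+1) (n - (j+1))).foldl (fun best k =>
        if L.getD i 0 + L.getD j 0 > L.getD k 0 then
          max best (L.getD i 0 * L.getD j 0 * L.getD k 0)
        else best) best) best) 0

def largest_triangle_alt (A : List Int) : Int :=
  if A.length < 3 then 0
  else pvBruteB (PySem.List.sorted A (fun x => x) false)

-- ===== PRECONDITION & SPEC =====
def Spec_largest_triangle (A : List Int) (out : Int) : Prop := out = largest_triangle_alt A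
instance (A : List Int) (out : Int) : Decidable (Spec_largest_triangle A out) := by unfold Spec_largest_triangle; infer_instance

-- ===== CLAIM (what is proved, stated in full; the proofs are below) =====
def Claim_equal_largest_triangle : Prop := ∀ (A : List Int), Dom_largest_triangle A → Spec_largest_triangle A (largest_triangle A)

-- ===== LEMMAS AND PROOFS =====

-- generic foldl lemmas -------------------------------------------------------

theorem pv_foldl_ge_init {β : Type} (f : Int → β → Int) (h : ∀ b x, b ≤ f b x) :
    ∀ (l : List β) (init : Int), init ≤ l.foldl f init := by
  intro l
  induction l with
  | nil => intro init; simp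
  | cons a l ih =>
      intro init
      exact le_trans (h init a) (ih (f init a))

theorem pv_foldl_ge_of_mem {β : Type} (f : Int → β → Int) (h : ∀ b x, b ≤ f b x)
    (c : Int) :
    ∀ (l : List β) (init : Int) (x : β), x ∈ l → (∀ b, c ≤ f b x) → c ≤ l.foldl f init := by
  intro l
  induction l with
  | nil => intro init x hx; simp at hx
  | cons a l ih =>
      intro init x hx hc
      rcases List.mem_cons.mp hx with rfl | hx'
      · exact le_trans (hc init) (pv_foldl_ge_init f h l (f init x))
      · exact ih (f init a) x hx' hc

theorem pv_foldl_cases {β : Type} (f : Int → β → Int) (P : Int → Prop) :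
    ∀ (l : List β) (init : Int), (∀ b x, x ∈ l → f b x = b ∨ P (f b x)) →
      l.foldl f init = init ∨ P (l.foldl f init) := by
  intro l
  induction l with
  | nil => intro init _; left; rfl
  | cons a l ih =>
      intro init h
      have h' : ∀ b x, x ∈ l → f b x = b ∨ P (f b x) :=
        fun b x hx => h b x (List.mem_cons_of_mem _ hx)
      rcases h init a List.mem_cons_self with ha | ha
      · simpa [List.foldl, ha] using ih init h'
      · rcases ih (f init a) h' with he | hp
        · right; simpa [List.foldl, he] using ha
        · right; simpa [List.foldl] using hp

-- arithmetic helper: positive componentwise-dominated products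
theorem pv_prod_mono {a b c a' b' c' : Int} (ha : 0 < a) (hb : 0 < b) (hc : 0 < c)
    (h1 : a ≤ a') (h2 : b ≤ b') (h3 : c ≤ c') : a * b * c ≤ a' * b' * c' := by
  have hab : a * b ≤ a' * b' :=
    mul_le_mul h1 h2 (le_of_lt hb) (le_trans (le_of_lt ha) h1)
  exact mul_le_mul hab h3 (le_of_lt hc)
    (mul_nonneg (le_trans (le_of_lt ha) h1) (le_trans (le_of_lt hb) h2))

-- sorted-list access is monotone in the index
theorem pv_sorted_mono (A : List Int) {i j : Nat} (hij : i ≤ j)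
    (hj : j < (PySem.List.sorted A (fun x => x) false).length) :
    (PySem.List.sorted A (fun x => x) false).getD i 0 ≤
      (PySem.List.sorted A (fun x => x) false).getD j 0 := by
  rw [List.getD_eq_getElem _ _ (lt_of_le_of_lt hij hj), List.getD_eq_getElem _ _ hj]
  exact PySem.List.sorted_id_getElem_mono A hij hj

-- facts about the brute-force fold ------------------------------------------

theorem pv_brute_inner_ge (L : List Int) (n : Nat) (i : Nat) :
    ∀ b, b ≤ (List.range' (i+1) (n - (i+1))).foldl (fun best j =>
      (List.range' (j+1) (n - (j+1))).foldl (fun best k =>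
        if L.getD i 0 + L.getD j 0 > L.getD k 0 then
          max best (L.getD i 0 * L.getD j 0 * L.getD k 0)
        else best) best) b := by
  intro b
  apply pv_foldl_ge_init
  intro b' j
  apply pv_foldl_ge_init
  intro b'' k
  dsimp only
  split
  · exact le_max_left _ _
  · exact le_refl _

theorem pv_brute_nonneg (L : List Int) : 0 ≤ pvBruteB L := by
  unfold pvBruteB
  apply pv_foldl_ge_init
  intro b i
  exact pv_brute_inner_ge L L.length i b

theorem pv_brute_ge (L : List Int) {i j k : Nat} (hij : i < j) (hjk : j < k)
    (hk : k < L.length) (hv : L.getD k 0 < L.getD i 0 + L.getD j 0) :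
    L.getD i 0 * L.getD j 0 * L.getD k 0 ≤ pvBruteB L := by
  unfold pvBruteB
  refine pv_foldl_ge_of_mem _ (fun b i' => pv_brute_inner_ge L L.length i' b) _ _ 0 i
    (List.mem_range.mpr (by omega)) ?_
  intro b
  refine pv_foldl_ge_of_mem _ ?_ _ _ b j (List.mem_range'_1.mpr (by omega)) ?_
  · intro b' j'
    apply pv_foldl_ge_init
    intro b'' k'
    dsimp only
    split
    · exact le_max_left _ _
    · exact le_refl _
  · intro b'
    refine pv_foldl_ge_of_mem _ ?_ _ _ b' k (List.mem_range'_1.mpr (by omega)) ?_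
    · intro b'' k'
      dsimp only
      split
      · exact le_max_left _ _
      · exact le_refl _
    · intro b''
      dsimp only
      rw [if_pos hv]
      exact le_max_right _ _

def pvIsTriple (L : List Int) (r : Int) : Prop :=
  ∃ i j k : Nat, i < j ∧ j < k ∧ k < L.length ∧
    L.getD k 0 < L.getD i 0 + L.getD j 0 ∧
    r = L.getD i 0 * L.getD j 0 * L.getD k 0

theorem pv_brute_cases (L : List Int) : pvBruteB L = 0 ∨ pvIsTriple L (pvBruteB L) := by
  unfold pvBruteB
  apply pv_foldl_cases _ (pvIsTriple L)
  intro b i hi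
  have hi' : i < L.length := List.mem_range.mp hi
  apply pv_foldl_cases _ (pvIsTriple L)
  intro b' j hj
  have hj' := List.mem_range'_1.mp hj
  apply pv_foldl_cases _ (pvIsTriple L)
  intro b'' k hk
  have hk' := List.mem_range'_1.mp hk
  split
  next h =>
    rcases max_choice b'' (L.getD i 0 * L.getD j 0 * L.getD k 0) with h1 | h1
    · left; exact h1
    · right; rw [h1]
      exact ⟨i, j, k, by omega, by omega, by omega, h, rfl⟩
  next h => left; rfl

-- facts about A's scan -------------------------------------------------------

theorem pv_scan_cases (L : List Int) :
    ∀ m, pvScanA L m = 0 ∨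
      ∃ c, c ≤ m ∧ L.getD (c+2) 0 < L.getD c 0 + L.getD (c+1) 0 ∧
        pvScanA L m = L.getD c 0 * L.getD (c+1) 0 * L.getD (c+2) 0 := by
  intro m
  induction m with
  | zero =>
      by_cases h : L.getD 0 0 + L.getD 1 0 > L.getD 2 0
      · right
        exact ⟨0, le_refl _, h, by simp only [pvScanA]; rw [if_pos h]⟩
      · left
        simp only [pvScanA]; rw [if_neg h]
  | succ i ih =>
      by_cases h : L.getD (i+1) 0 + L.getD (i+2) 0 > L.getD (i+3) 0
      · right
        exact ⟨i+1, le_refl _, h, by simp only [pvScanA]; rw [if_pos h]⟩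
      · rcases ih with h0 | ⟨c, hc, hv, he⟩
        · left
          simp only [pvScanA]; rw [if_neg h]; exact h0
        · right
          exact ⟨c, by omega, hv, by simp only [pvScanA]; rw [if_neg h]; exact he⟩

-- all sides of a valid consecutive triple in a nondecreasing list are positive
theorem pv_pos_consec (L : List Int)
    (hmono : ∀ (i j : Nat), i ≤ j → j < L.length → L.getD i 0 ≤ L.getD j 0)
    {c : Nat} (hc : c + 2 < L.length)
    (hv : L.getD (c+2) 0 < L.getD c 0 + L.getD (c+1) 0) :
    0 < L.getD c 0 := by
  have h1 := hmono c (c+1) (by omega) (by omega)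
  have h2 := hmono (c+1) (c+2) (by omega) hc
  omega

theorem pv_scan_ge (L : List Int)
    (hmono : ∀ (i j : Nat), i ≤ j → j < L.length → L.getD i 0 ≤ L.getD j 0) :
    ∀ m, m + 3 ≤ L.length →
      ∀ c, c ≤ m → L.getD (c+2) 0 < L.getD c 0 + L.getD (c+1) 0 →
        L.getD c 0 * L.getD (c+1) 0 * L.getD (c+2) 0 ≤ pvScanA L m := by
  intro m
  induction m with
  | zero =>
      intro hn c hc hv
      interval_cases c
      simp only [pvScanA]
      rw [if_pos hv]
  | succ i ih =>
      intro hn c hc hv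
      by_cases h : L.getD (i+1) 0 + L.getD (i+2) 0 > L.getD (i+3) 0
      · simp only [pvScanA]
        rw [if_pos h]
        rcases Nat.eq_or_lt_of_le hc with rfl | hlt
        · exact le_refl _
        · -- c ≤ i : the topmost valid consecutive triple dominates componentwise
          have hc0 : 0 < L.getD c 0 := pv_pos_consec L hmono (by omega) hv
          have hc1 : 0 < L.getD (c+1) 0 :=
            lt_of_lt_of_le hc0 (hmono c (c+1) (by omega) (by omega))
          have hc2 : 0 < L.getD (c+2) 0 :=
            lt_of_lt_of_le hc1 (hmono (c+1) (c+2) (by omega) (by omega))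
          exact pv_prod_mono hc0 hc1 hc2
            (hmono c (i+1) (by omega) (by omega))
            (hmono (c+1) (i+2) (by omega) (by omega))
            (hmono (c+2) (i+3) (by omega) (by omega))
      · simp only [pvScanA]
        rw [if_neg h]
        have hci : c ≤ i := by
          rcases Nat.eq_or_lt_of_le hc with rfl | hlt
          · exact absurd hv (by omega)
          · omega
        exact ih (by omega) c hci hv

theorem pv_scan_nonneg (L : List Int)
    (hmono : ∀ (i j : Nat), i ≤ j → j < L.length → L.getD i 0 ≤ L.getD j 0)
    (m : Nat) (hn : m + 3 ≤ L.length) : 0 ≤ pvScanA L m := by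
  rcases pv_scan_cases L m with h0 | ⟨c, hc, hv, he⟩
  · rw [h0]
  · rw [he]
    have hc0 := pv_pos_consec L hmono (by omega) hv
    have hc1 := lt_of_lt_of_le hc0 (hmono c (c+1) (by omega) (by omega))
    have hc2 := lt_of_lt_of_le hc1 (hmono (c+1) (c+2) (by omega) (by omega))
    positivity

-- main equality --------------------------------------------------------------

theorem pv_main_sorted (L : List Int)
    (hmono : ∀ (i j : Nat), i ≤ j → j < L.length → L.getD i 0 ≤ L.getD j 0)
    (hn : 3 ≤ L.length) : pvScanA L (L.length - 3) = pvBruteB L := by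
  apply le_antisymm
  · -- scan ≤ brute
    rcases pv_scan_cases L (L.length - 3) with h0 | ⟨c, hc, hv, he⟩
    · rw [h0]; exact pv_brute_nonneg L
    · rw [he]
      exact pv_brute_ge L (by omega) (by omega) (by omega) hv
  · -- brute ≤ scan
    rcases pv_brute_cases L with h0 | ⟨i, j, k, hij, hjk, hk, hv, he⟩
    · rw [h0]
      exact pv_scan_nonneg L hmono (L.length - 3) (by omega)
    · rw [he]
      -- move to the consecutive triple (k-2, k-1, k)
      have hk3 : k - 2 + 2 = k := by omega
      have hgi : L.getD i 0 ≤ L.getD (k-2) 0 := hmono i (k-2) (by omega) (by omega)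
      have hgj : L.getD j 0 ≤ L.getD (k-2+1) 0 := hmono j (k-2+1) (by omega) (by omega)
      have hvi : 0 < L.getD i 0 := by
        have h1 := hmono i j (le_of_lt hij) (by omega)
        have h2 := hmono j k (le_of_lt hjk) hk
        omega
      have hvj : 0 < L.getD j 0 :=
        lt_of_lt_of_le hvi (hmono i j (le_of_lt hij) (by omega))
      have hvk : 0 < L.getD k 0 :=
        lt_of_lt_of_le hvj (hmono j k (le_of_lt hjk) hk)
      have hvc : L.getD (k-2+2) 0 < L.getD (k-2) 0 + L.getD (k-2+1) 0 := by
        rw [hk3]; omega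
      have hstep : L.getD i 0 * L.getD j 0 * L.getD k 0 ≤
          L.getD (k-2) 0 * L.getD (k-2+1) 0 * L.getD (k-2+2) 0 := by
        rw [hk3]
        exact pv_prod_mono hvi hvj hvk hgi hgj (le_refl _)
      exact le_trans hstep (pv_scan_ge L hmono (L.length - 3) (by omega) (k-2) (by omega) hvc)

theorem pv_main (A : List Int) : largest_triangle A = largest_triangle_alt A := by
  unfold largest_triangle largest_triangle_alt
  by_cases h : A.length ≥ 3
  · rw [if_pos h, if_neg (by omega)]
    have hlen : (PySem.List.sorted A (fun x => x) false).length = A.length :=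
      PySem.List.length_sorted A _ _
    exact pv_main_sorted _ (fun i j hij hj => pv_sorted_mono A hij hj) (by omega)
  · rw [if_neg h, if_pos (by omega)]

-- ===== VERDICT (by name: the statement is the Claim_ definition above) =====
theorem largest_triangle_spec : Claim_equal_largest_triangle := by
  intro A _
  unfold Spec_largest_triangle
  exact pv_main A
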